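-- pv_equiv track=rewrite | github.com/sanchitsingh001/NarrativeWorlds | visualize_tilemaps.py | is_single_tile_corridor
-- ===== SOURCE A (Python) =====
-- DIR_4 = [(1, 0), (-1, 0), (0, 1), (0, -1)]  # E, W, N, S
--
-- def in_bounds(x: int, y: int, grid_w: int, grid_h: int) -> bool:
--     """Check if grid coordinates are within bounds."""
--     return 0 <= x < grid_w and 0 <= y < grid_h
--
-- def is_single_tile_corridor(
--     x: int, y: int,
--     road_mask: list[list[bool]],
--     grid_w: int,
--     grid_h: int
-- ) -> bool:
--     """
--     Check if a road tile is a single-tile corridor (pinch point).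
--     A tile is a pinch if it's a road but has no road neighbors in perpendicular directions.
--     """
--     # Count neighbors in cardinal directions
--     neighbors = []
--     for dx, dy in DIR_4:
--         nx, ny = x + dx, y + dy
--         if in_bounds(nx, ny, grid_w, grid_h) and road_mask[ny][nx]:
--             neighbors.append((dx, dy))
--
--     if len(neighbors) < 2:
--         return True  # Dead end or isolated
--
--     if len(neighbors) == 2:
--         # Check if neighbors are opposite (corridor) and no perpendicular neighbors
--         d1, d2 = neighbors
--         # If they're opposite, it's a corridor
--         if (d1[0] + d2[0] == 0 and d1[1] + d2[1] == 0):
--             # Check perpendicular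
--             if d1[0] == 0:  # Vertical corridor, check horizontal
--                 has_horiz = False
--                 for dx in [-1, 1]:
--                     nx = x + dx
--                     if in_bounds(nx, y, grid_w, grid_h) and road_mask[y][nx]:
--                         has_horiz = True
--                 return not has_horiz
--             else:  # Horizontal corridor, check vertical
--                 has_vert = False
--                 for dy in [-1, 1]:
--                     ny = y + dy
--                     if in_bounds(x, ny, grid_w, grid_h) and road_mask[ny][x]:
--                         has_vert = True
--                 return not has_vert
--
--     return False
-- ===== SOURCE B (Python) =====
-- # Table-driven: encode the four cardinal road flags as a 4-bit mask and
-- # decide "pinch" by a single lookup in a precomputed 16-entry table.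
-- _PINCH_TABLE = (
--     True,  True,  True,  True,   # 0..3   : <2 neighbors, or E+W pair (3)
--     True,  False, False, False,  # 4..7
--     True,  False, False, False,  # 8..11
--     True,  False, False, False,  # 12 = N+S pair; rest have perpendicular arms
-- )
--
-- def is_single_tile_corridor(x, y, road_mask, grid_w, grid_h):
--     mask = 0
--     if 0 <= x + 1 < grid_w and 0 <= y < grid_h and road_mask[y][x + 1]:
--         mask |= 1
--     if 0 <= x - 1 < grid_w and 0 <= y < grid_h and road_mask[y][x - 1]:
--         mask |= 2
--     if 0 <= x < grid_w and 0 <= y + 1 < grid_h and road_mask[y + 1][x]: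
--         mask |= 4
--     if 0 <= x < grid_w and 0 <= y - 1 < grid_h and road_mask[y - 1][x]:
--         mask |= 8
--     return _PINCH_TABLE[mask]
-- ===== Notes on version B (the rewrite author's own statement) =====
-- stated objective: alternative
-- what changed: B replaces A's neighbour-list building, length/opposite-pair branching and perpendicular re-scan with a 4-bit neighbour mask indexing a precomputed 16-entry truth table.
import Mathlib
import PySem

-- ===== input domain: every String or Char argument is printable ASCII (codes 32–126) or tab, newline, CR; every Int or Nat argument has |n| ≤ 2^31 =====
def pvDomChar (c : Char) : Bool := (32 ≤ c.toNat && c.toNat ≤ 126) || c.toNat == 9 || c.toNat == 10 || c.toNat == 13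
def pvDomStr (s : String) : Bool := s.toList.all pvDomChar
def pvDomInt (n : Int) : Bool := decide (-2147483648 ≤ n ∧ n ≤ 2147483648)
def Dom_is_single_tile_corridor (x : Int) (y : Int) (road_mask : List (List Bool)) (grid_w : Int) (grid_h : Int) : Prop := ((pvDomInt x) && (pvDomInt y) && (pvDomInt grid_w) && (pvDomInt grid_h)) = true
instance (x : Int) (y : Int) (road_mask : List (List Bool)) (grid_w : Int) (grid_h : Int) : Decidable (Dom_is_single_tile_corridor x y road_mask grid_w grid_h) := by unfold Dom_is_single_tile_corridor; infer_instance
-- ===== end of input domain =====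

-- B replaces A's neighbour-list building, branching and perpendicular re-scan by a 4-bit neighbour mask indexing a precomputed 16-entry truth table (alternative formulation, same behaviour).



-- ===== PORT A =====
-- helper in_bounds, and the read road_mask[j][i]
def pvInBounds (i : Int) (j : Int) (gw : Int) (gh : Int) : Bool :=
  decide (0 <= i) && decide (i < gw) && decide (0 <= j) && decide (j < gh)

-- road_mask[j][i]; Python raises IndexError when the index is out of range; those
-- inputs are excluded by Pre_, so the 'none -> false' default is never reached there.
def pvRoadAt (m : List (List Bool)) (j : Int) (i : Int) : Bool :=
  ((PySem.List.pyGet? m j).bind (fun row => PySem.List.pyGet? row i)).getD false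

def pvDIR4 : List (Int × Int) := [(1, 0), (-1, 0), (0, 1), (0, -1)]

def is_single_tile_corridor (x : Int) (y : Int) (road_mask : List (List Bool)) (grid_w : Int) (grid_h : Int) : Bool :=
  let neighbors := pvDIR4.foldl (fun acc d =>
    let nx := x + d.1
    let ny := y + d.2
    if pvInBounds nx ny grid_w grid_h && pvRoadAt road_mask ny nx then acc ++ [d] else acc) []
  if neighbors.length < 2 then
    true
  else if neighbors.length == 2 then
    match neighbors with
    | [d1, d2] =>
      if d1.1 + d2.1 == 0 && d1.2 + d2.2 == 0 then
        if d1.1 == 0 then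
          let has_horiz := [(-1 : Int), 1].foldl (fun h dx =>
            let nx := x + dx
            if pvInBounds nx y grid_w grid_h && pvRoadAt road_mask y nx then true else h) false
          !has_horiz
        else
          let has_vert := [(-1 : Int), 1].foldl (fun h dy =>
            let ny := y + dy
            if pvInBounds x ny grid_w grid_h && pvRoadAt road_mask ny x then true else h) false
          !has_vert
      else false
    | _ => false
  else false

-- ===== PORT B =====
def pvPinchTable : List Bool :=
  [true,  true,  true,  true,
   true,  false, false, false,
   true,  false, false, false,
   true,  false, false, false]

def is_single_tile_corridor_alt (x : Int) (y : Int) (road_mask : List (List Bool)) (grid_w : Int) (grid_h : Int) : Bool :=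
  let m0 : Nat := 0
  let m1 := if decide (0 ≤ x + 1) && decide (x + 1 < grid_w) && decide (0 ≤ y) && decide (y < grid_h) && pvRoadAt road_mask y (x + 1) then m0 ||| 1 else m0
  let m2 := if decide (0 ≤ x - 1) && decide (x - 1 < grid_w) && decide (0 ≤ y) && decide (y < grid_h) && pvRoadAt road_mask y (x - 1) then m1 ||| 2 else m1
  let m3 := if decide (0 ≤ x) && decide (x < grid_w) && decide (0 ≤ y + 1) && decide (y + 1 < grid_h) && pvRoadAt road_mask (y + 1) x then m2 ||| 4 else m2
  let mask := if decide (0 ≤ x) && decide (x < grid_w) && decide (0 ≤ y - 1) && decide (y - 1 < grid_h) && pvRoadAt road_mask (y - 1) x then m3 ||| 8 else m3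
  -- _PINCH_TABLE[mask]: mask < 16 always, so plain getD is exact (no IndexError path)
  pvPinchTable.getD mask false

-- ===== PRECONDITION & SPEC =====
-- Pre_ excludes exactly the inputs where A raises IndexError: a probed neighbour cell
-- that in_bounds accepts but whose row/entry does not exist in road_mask.
def pvReadOK (m : List (List Bool)) (i : Int) (j : Int) (gw : Int) (gh : Int) : Bool :=
  !(pvInBounds i j gw gh) ||
    (decide (j.toNat < m.length) && decide (i.toNat < (m.getD j.toNat []).length))

def Pre_is_single_tile_corridor (x : Int) (y : Int) (road_mask : List (List Bool)) (grid_w : Int) (grid_h : Int) : Prop :=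
  pvReadOK road_mask (x + 1) y grid_w grid_h = true ∧
  pvReadOK road_mask (x - 1) y grid_w grid_h = true ∧
  pvReadOK road_mask x (y + 1) grid_w grid_h = true ∧
  pvReadOK road_mask x (y - 1) grid_w grid_h = true

instance (x : Int) (y : Int) (road_mask : List (List Bool)) (grid_w : Int) (grid_h : Int) : Decidable (Pre_is_single_tile_corridor x y road_mask grid_w grid_h) := by unfold Pre_is_single_tile_corridor; infer_instance

def pvWitness_is_single_tile_corridor : Int × Int × List (List Bool) × Int × Int :=
  (1, 1, [[false, true, false], [true, true, true], [false, true, false]], 3, 3)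

def Spec_is_single_tile_corridor (x : Int) (y : Int) (road_mask : List (List Bool)) (grid_w : Int) (grid_h : Int) (out : Bool) : Prop := out = is_single_tile_corridor_alt x y road_mask grid_w grid_h
instance (x : Int) (y : Int) (road_mask : List (List Bool)) (grid_w : Int) (grid_h : Int) (out : Bool) : Decidable (Spec_is_single_tile_corridor x y road_mask grid_w grid_h out) := by unfold Spec_is_single_tile_corridor; infer_instance

-- ===== CLAIM =====
def Claim_equal_is_single_tile_corridor : Prop := ∀ (x : Int) (y : Int) (road_mask : List (List Bool)) (grid_w : Int) (grid_h : Int), Dom_is_single_tile_corridor x y road_mask grid_w grid_h → Pre_is_single_tile_corridor x y road_mask grid_w grid_h → Spec_is_single_tile_corridor x y road_mask grid_w grid_h (is_single_tile_corridor x y road_mask grid_w grid_h)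

-- ===== LEMMAS AND PROOFS =====
-- A's and B's bodies with the four neighbour flags abstracted; equality is a 16-case check.
def pvAcore (e : Bool) (w : Bool) (n : Bool) (s : Bool) : Bool :=
  let l1 : List (Int × Int) := if e then [] ++ [(1, 0)] else []
  let l2 := if w then l1 ++ [(-1, 0)] else l1
  let l3 := if n then l2 ++ [(0, 1)] else l2
  let neighbors := if s then l3 ++ [(0, -1)] else l3
  if neighbors.length < 2 then
    true
  else if neighbors.length == 2 then
    match neighbors with
    | [d1, d2] =>
      if d1.1 + d2.1 == 0 && d1.2 + d2.2 == 0 then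
        if d1.1 == 0 then
          let has_horiz := if e then true else if w then true else false
          !has_horiz
        else
          let has_vert := if n then true else if s then true else false
          !has_vert
      else false
    | _ => false
  else false

def pvBcore (e : Bool) (w : Bool) (n : Bool) (s : Bool) : Bool :=
  let m0 : Nat := 0
  let m1 := if e then m0 ||| 1 else m0
  let m2 := if w then m1 ||| 2 else m1
  let m3 := if n then m2 ||| 4 else m2
  let mask := if s then m3 ||| 8 else m3
  pvPinchTable.getD mask false

theorem pvCoreEq (e : Bool) (w : Bool) (n : Bool) (s : Bool) : pvAcore e w n s = pvBcore e w n s := by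
  cases e <;> cases w <;> cases n <;> cases s <;> decide

theorem pvA_eq_core (x : Int) (y : Int) (m : List (List Bool)) (gw : Int) (gh : Int) :
    is_single_tile_corridor x y m gw gh =
      pvAcore (pvInBounds (x + 1) y gw gh && pvRoadAt m y (x + 1))
              (pvInBounds (x - 1) y gw gh && pvRoadAt m y (x - 1))
              (pvInBounds x (y + 1) gw gh && pvRoadAt m (y + 1) x)
              (pvInBounds x (y - 1) gw gh && pvRoadAt m (y - 1) x) := by
  unfold is_single_tile_corridor pvAcore pvDIR4
  simp only [List.foldl, sub_eq_add_neg, add_zero]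

theorem pvB_eq_core (x : Int) (y : Int) (m : List (List Bool)) (gw : Int) (gh : Int) :
    is_single_tile_corridor_alt x y m gw gh =
      pvBcore (pvInBounds (x + 1) y gw gh && pvRoadAt m y (x + 1))
              (pvInBounds (x - 1) y gw gh && pvRoadAt m y (x - 1))
              (pvInBounds x (y + 1) gw gh && pvRoadAt m (y + 1) x)
              (pvInBounds x (y - 1) gw gh && pvRoadAt m (y - 1) x) := by
  rfl

-- ===== VERDICT =====
theorem is_single_tile_corridor_spec : Claim_equal_is_single_tile_corridor := by
  intro x y road_mask grid_w grid_h _ _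
  unfold Spec_is_single_tile_corridor
  rw [pvA_eq_core, pvB_eq_core, pvCoreEq]
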